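-- pv_equiv track=rewrite | github.com/geswanel/Algorithms | YaAlgoTrainings/Training4.0/0WarmUp/warmup.py | lift_time
-- ===== SOURCE A (Python) =====
-- def lift_time(floors: list, l_cap: int):
--     cur_cap = 0
--     time = 0
--     while len(floors) > 0:
--         while len(floors) > 0 and floors[-1] == 0:
--             floors.pop()
--
--         if cur_cap == 0:
--             cur_cap = l_cap
--
--         time += len(floors) * 2
--
--         while len(floors) > 0 and cur_cap >= floors[-1]:
--             cur_cap -= floors[-1]
--             floors.pop()
--         else:
--             if len(floors) > 0:
--                 floors[-1] -= cur_cap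
--                 cur_cap = 0
--
--     return time
-- ===== SOURCE B (Python) =====
-- def lift_time(floors: list, l_cap: int):
--     # Single top-down pass (no list mutation): serve each floor against the
--     # current trip's remaining capacity; a floor too big for whole trips is
--     # settled with one divmod instead of one loop iteration per trip.
--     def boundary(v, floor, time):
--         # start new trip(s) at this floor; -> (remaining capacity or None, time)
--         if v == 0:
--             return None, time
--         if v <= l_cap:
--             return l_cap - v, time + 2 * floor
--         k = (v - 1) // l_cap
--         return l_cap - (v - k * l_cap), time + 2 * floor * (k + 1)
--
--     time = 0
--     c = None
--     floor = len(floors)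
--     for v in reversed(floors):
--         if c is None:
--             c, time = boundary(v, floor, time)
--         elif v <= c:
--             c -= v
--         else:
--             c, time = boundary(v - c, floor, time)
--         floor -= 1
--     return time
-- ===== Notes on version B (the rewrite author's own statement) =====
-- stated objective: faster
-- what changed: Replaces the mutating trip-by-trip simulation (one outer iteration per lift trip, popping from the list) with a single non-mutating top-down pass that settles all the repeated capacity-sized trips stuck at one floor with a divmod.
-- outside the precondition, e.g. on lift_time([2, -3], -1): A returns 4, B returns 4; on lift_time([-5], -1): A returns 2, B returns 2
import Mathlib
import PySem

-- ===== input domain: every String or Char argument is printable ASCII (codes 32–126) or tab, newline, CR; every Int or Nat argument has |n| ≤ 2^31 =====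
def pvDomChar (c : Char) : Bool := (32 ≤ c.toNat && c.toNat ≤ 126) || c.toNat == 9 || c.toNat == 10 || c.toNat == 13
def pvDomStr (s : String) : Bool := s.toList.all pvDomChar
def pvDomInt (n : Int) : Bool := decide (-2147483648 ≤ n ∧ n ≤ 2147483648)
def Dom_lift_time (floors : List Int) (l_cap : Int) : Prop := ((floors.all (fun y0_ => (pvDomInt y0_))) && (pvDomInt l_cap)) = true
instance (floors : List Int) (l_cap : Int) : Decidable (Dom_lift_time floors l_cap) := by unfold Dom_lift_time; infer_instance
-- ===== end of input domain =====

-- B replaces A's mutating trip-by-trip simulation by one top-down pass that batches repeated trips at a stuck floor with a divmod.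
-- A empties the caller's list in place; the equivalence proved here is about the RETURN value only (B does not mutate).

-- ===== PORT A =====
-- inner loop: while len(floors) > 0 and floors[-1] == 0: floors.pop()
def lt_strip (fs : List Int) : List Int :=
  if h : fs ≠ [] ∧ fs.getLast! = 0 then lt_strip fs.dropLast else fs
termination_by fs.length
decreasing_by have := List.length_pos_of_ne_nil h.1; simp [List.length_dropLast]; omega

-- inner loop: while len(floors) > 0 and cur_cap >= floors[-1]: cur_cap -= floors[-1]; floors.pop()
def lt_serve (fs : List Int) (cap : Int) : List Int × Int :=
  if h : fs ≠ [] ∧ fs.getLast! ≤ cap then lt_serve fs.dropLast (cap - fs.getLast!) else (fs, cap)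
termination_by fs.length
decreasing_by have := List.length_pos_of_ne_nil h.1; simp [List.length_dropLast]; omega

-- outer while loop, fuel-bounded (the fuel is sufficient on Pre_; A diverges e.g. for l_cap ≤ 0)
def lt_loop : Nat → List Int → Int → Int → Int → Int
  | 0, _, _, time, _ => time
  | fuel+1, fs, cap, time, L =>
    if fs.length > 0 then
      let fs1 := lt_strip fs
      let cap1 := if cap == 0 then L else cap
      let time1 := time + (fs1.length : Int) * 2
      let sc := lt_serve fs1 cap1
      -- while ... else: if len(floors) > 0: floors[-1] -= cur_cap; cur_cap = 0
      if sc.1.length > 0 then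
        lt_loop fuel (sc.1.dropLast ++ [sc.1.getLast! - sc.2]) 0 time1 L
      else
        lt_loop fuel sc.1 sc.2 time1 L
    else time

def lift_time (floors : List Int) (l_cap : Int) : Int :=
  lt_loop ((floors.map Int.toNat).sum + floors.length + 2) floors 0 0 l_cap

-- ===== PORT B =====
-- helper boundary(v, floor, time): start new trip(s) at this floor
def lt_boundary (L v floor time : Int) : Option Int × Int :=
  if v = 0 then (none, time)
  else if v ≤ L then (some (L - v), time + 2 * floor)
  else
    let k := PySem.Int.floordiv (v - 1) L
    (some (L - (v - k * L)), time + 2 * floor * (k + 1))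

def lift_time_alt (floors : List Int) (l_cap : Int) : Int :=
  (floors.reverse.foldl
    (fun (st : Option Int × Int × Int) v =>
      let c := st.1
      let time := st.2.1
      let floor := st.2.2
      let ct :=
        match c with
        | none => lt_boundary l_cap v floor time
        | some cc => if v ≤ cc then (some (cc - v), time) else lt_boundary l_cap (v - cc) floor time
      (ct.1, ct.2, floor - 1))
    (none, 0, (floors.length : Int))).2.1

-- ===== PRECONDITION & SPEC =====
-- Pre_ excludes nonpositive capacity: there A loops forever whenever a positive floor remains,
-- returning only on degenerate all-nonpositive patterns (on the cited such inputs B agrees with A anyway).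
def Pre_lift_time (floors : List Int) (l_cap : Int) : Prop := 1 ≤ l_cap
instance (floors : List Int) (l_cap : Int) : Decidable (Pre_lift_time floors l_cap) := by
  unfold Pre_lift_time; infer_instance

def pvWitness_lift_time : List Int × Int := ([1, 2, 3], 2)

def Spec_lift_time (floors : List Int) (l_cap : Int) (out : Int) : Prop := out = lift_time_alt floors l_cap
instance (floors : List Int) (l_cap : Int) (out : Int) : Decidable (Spec_lift_time floors l_cap out) := by unfold Spec_lift_time; infer_instance

-- ===== CLAIM (what is proved, stated in full; the proofs are below) =====
def Claim_equal_lift_time : Prop := ∀ (floors : List Int) (l_cap : Int), Dom_lift_time floors l_cap → Pre_lift_time floors l_cap → Spec_lift_time floors l_cap (lift_time floors l_cap)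

-- ===== LEMMAS AND PROOFS =====

-- Reversed-world versions of A's inner loops (head operations instead of last-element operations).
def stripR : List Int → List Int
  | [] => []
  | v :: r => if v = 0 then stripR r else v :: r

def serveR : List Int → Int → List Int × Int
  | [], c => ([], c)
  | v :: r, c => if v ≤ c then serveR r (c - v) else (v :: r, c)

-- B's scan, written as structural recursion on the reversed list (floor number = suffix length)
def bRun (L : Int) : List Int → Option Int → Int → Int
  | [], _, t => t
  | v :: r, none, t =>
    bRun L r (lt_boundary L v ((r.length : Int) + 1) t).1 (lt_boundary L v ((r.length : Int) + 1) t).2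
  | v :: r, some cc, t =>
    if v ≤ cc then bRun L r (some (cc - v)) t
    else bRun L r (lt_boundary L (v - cc) ((r.length : Int) + 1) t).1 (lt_boundary L (v - cc) ((r.length : Int) + 1) t).2

-- A's continuation after the pop loop (the while...else adjustment), B-side view
def bAdj (L : Int) : List Int × Int → Int → Int
  | ([], _), t => t
  | (w :: t2, c2), t => bRun L ((w - c2) :: t2) none t

def pvM (fs : List Int) : Nat := (fs.map Int.toNat).sum + fs.length

theorem pvM_reverse (fs : List Int) : pvM fs.reverse = pvM fs := by
  unfold pvM
  rw [List.map_reverse, List.sum_reverse_nat, List.length_reverse]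

theorem pvM_cons (v : Int) (r : List Int) : pvM (v :: r) = v.toNat + pvM r + 1 := by
  unfold pvM
  simp only [List.map_cons, List.sum_cons, List.length_cons]
  omega

theorem lt_strip_rev (r : List Int) : lt_strip r.reverse = (stripR r).reverse := by
  induction r with
  | nil => rw [lt_strip]; simp [stripR]
  | cons v t ih =>
    rw [lt_strip]
    by_cases hv : v = 0
    · simp [hv, stripR, ih]
    · simp [hv, stripR]

theorem lt_serve_rev (r : List Int) (c : Int) :
    lt_serve r.reverse c = ((serveR r c).1.reverse, (serveR r c).2) := by
  induction r generalizing c with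
  | nil => rw [lt_serve]; simp [serveR]
  | cons v t ih =>
    rw [lt_serve]
    by_cases hv : v ≤ c
    · simp [hv, serveR, ih]
    · simp [hv, serveR]

theorem lt_strip_eq (fs : List Int) : lt_strip fs = (stripR fs.reverse).reverse := by
  rw [← lt_strip_rev, List.reverse_reverse]

theorem lt_serve_eq (fs : List Int) (c : Int) :
    lt_serve fs c = ((serveR fs.reverse c).1.reverse, (serveR fs.reverse c).2) := by
  rw [← lt_serve_rev, List.reverse_reverse]

theorem lt_loop_nil (k : Nat) (cap time L : Int) : lt_loop (k+1) [] cap time L = time := by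
  simp [lt_loop]

theorem stripR_head {v : Int} {t r : List Int} (h : stripR r = v :: t) : v ≠ 0 := by
  induction r with
  | nil => simp [stripR] at h
  | cons w u ih =>
    by_cases hw : w = 0
    · simp only [stripR, if_pos hw] at h
      exact ih h
    · simp only [stripR, if_neg hw] at h
      injection h with h1 _
      rw [← h1]
      exact hw

theorem stripR_suffix (r : List Int) : (stripR r).IsSuffix r := by
  induction r with
  | nil => simp [stripR]
  | cons v t ih =>
    by_cases hv : v = 0
    · simp only [stripR, if_pos hv]
      exact ih.trans (List.suffix_cons _ _)
    · simp [stripR, hv]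

theorem serveR_suffix (r : List Int) (c : Int) : (serveR r c).1.IsSuffix r := by
  induction r generalizing c with
  | nil => simp [serveR]
  | cons v t ih =>
    by_cases hv : v ≤ c
    · simp only [serveR, if_pos hv]
      exact (ih (c - v)).trans (List.suffix_cons _ _)
    · simp [serveR, hv]

theorem serveR_cap_nonneg (r : List Int) (c : Int) (h : 0 ≤ c) : 0 ≤ (serveR r c).2 := by
  induction r generalizing c with
  | nil => simpa [serveR] using h
  | cons v t ih =>
    by_cases hv : v ≤ c
    · simp only [serveR, if_pos hv]
      exact ih (c - v) (by omega)
    · simpa [serveR, hv] using h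

theorem pvM_suffix {a b : List Int} (h : a.IsSuffix b) : pvM a ≤ pvM b := by
  obtain ⟨p, rfl⟩ := h
  unfold pvM
  simp only [List.map_append, List.sum_append, List.length_append]
  omega

theorem bRun_strip (L : Int) (r : List Int) (t : Int) :
    bRun L (stripR r) none t = bRun L r none t := by
  induction r with
  | nil => rfl
  | cons v u ih =>
    by_cases hv : v = 0
    · subst hv
      rw [show stripR (0 :: u) = stripR u from by simp [stripR], ih]
      have hb : lt_boundary L 0 ((u.length : Int) + 1) t = (none, t) := by
        simp [lt_boundary]
      simp [bRun, hb]
    · simp [stripR, hv]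

-- one failed (too-big floor) trip equals one step of the batched boundary
theorem boundary_dec (L : Int) (hL : 1 ≤ L) (v floor time : Int) (hv : L < v) :
    lt_boundary L v floor time = lt_boundary L (v - L) floor (time + 2 * floor) := by
  have hv0 : v ≠ 0 := by omega
  by_cases h2 : v - L ≤ L
  · -- last decrement: the batch size is exactly 1
    have hk : PySem.Int.floordiv (v - 1) L = 1 := by
      rw [PySem.Int.floordiv_eq_iff_of_pos (by omega)]
      omega
    simp only [lt_boundary, if_neg hv0, if_neg (by omega : ¬ v ≤ L), hk,
      if_neg (by omega : ¬ v - L = 0), if_pos h2, Prod.mk.injEq]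
    constructor
    · congr 1; ring
    · ring
  · have hk : PySem.Int.floordiv (v - L - 1) L = PySem.Int.floordiv (v - 1) L - 1 := by
      rw [PySem.Int.floordiv_eq_ediv_of_pos (by omega), PySem.Int.floordiv_eq_ediv_of_pos (by omega),
        show v - L - 1 = (v - 1) + (-1) * L by ring, Int.add_mul_ediv_right _ _ (by omega : L ≠ 0)]
      ring
    simp only [lt_boundary, if_neg hv0, if_neg (by omega : ¬ v ≤ L),
      if_neg (by omega : ¬ v - L = 0), if_neg (by omega : ¬ v - L ≤ L), hk, Prod.mk.injEq]
    constructor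
    · congr 1; ring
    · ring

-- B's mid-trip scan follows A's pop loop exactly
theorem bRun_pop (L : Int) : ∀ (r : List Int) (c t : Int),
    bRun L r (some c) t = bAdj L (serveR r c) t := by
  intro r
  induction r with
  | nil => intro c t; rfl
  | cons v u ih =>
    intro c t
    by_cases hv : v ≤ c
    · simp only [bRun, if_pos hv, serveR, ih]
    · simp only [bRun, if_neg hv, serveR, bAdj]

theorem loop_eq (L : Int) (hL : 1 ≤ L) : ∀ (fuel : Nat) (fs : List Int) (time : Int),
    pvM fs + 1 ≤ fuel →
    lt_loop fuel fs 0 time L = bRun L fs.reverse none time := by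
  intro fuel
  induction fuel with
  | zero => intro fs time hfuel; omega
  | succ fuel ih =>
    intro fs time hfuel
    by_cases hfs : fs = []
    · subst hfs
      rw [lt_loop_nil]
      rfl
    · have hlen : 0 < fs.length := List.length_pos_of_ne_nil hfs
      have hfuel1 : 1 ≤ fuel := by
        have : 1 ≤ pvM fs := by unfold pvM; omega
        omega
      rw [lt_loop, if_pos hlen]
      simp only [lt_strip_eq, lt_serve_eq, List.reverse_reverse, beq_self_eq_true, if_true]
      rw [← bRun_strip L fs.reverse time]
      have hMstrip : pvM (stripR fs.reverse) ≤ pvM fs := by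
        have h1 := pvM_suffix (stripR_suffix fs.reverse)
        have h2 := pvM_reverse fs
        omega
      rcases h1 : stripR fs.reverse with _ | ⟨v, t1⟩
      · -- the strip emptied the list: the next check exits the loop
        obtain ⟨k, rfl⟩ : ∃ k, fuel = k + 1 := ⟨fuel - 1, by omega⟩
        simp only [serveR, List.reverse_nil, List.length_nil, gt_iff_lt, lt_irrefl, if_false,
          Int.natCast_zero, zero_mul, add_zero]
        rw [lt_loop_nil]
        rfl
      · have hv0 : v ≠ 0 := stripR_head h1
        rw [h1] at hMstrip
        by_cases hv : v ≤ L
        · -- the trip pops this floor at once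
          have hserve : serveR (v :: t1) L = serveR t1 (L - v) := by
            simp [serveR, hv]
          rw [hserve]
          have hbr : bRun L (v :: t1) none time =
              bAdj L (serveR t1 (L - v)) (time + ((t1.length : Int) + 1) * 2) := by
            simp only [bRun, lt_boundary, if_neg hv0, if_pos hv, bRun_pop]
            congr 1
            ring
          rw [hbr]
          rcases h2 : (serveR t1 (L - v)).1 with _ | ⟨w, t2⟩
          · obtain ⟨k, rfl⟩ : ∃ k, fuel = k + 1 := ⟨fuel - 1, by omega⟩
            have hpair : serveR t1 (L - v) = ([], (serveR t1 (L - v)).2) := by rw [← h2]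
            rw [hpair]
            simp only [List.reverse_nil, List.length_nil, gt_iff_lt, lt_irrefl, if_false]
            rw [lt_loop_nil]
            simp only [bAdj]
            simp only [List.length_reverse, List.length_cons]
            push_cast
            ring
          · have hc2 : 0 ≤ (serveR t1 (L - v)).2 := serveR_cap_nonneg t1 (L - v) (by omega)
            have hpair : serveR t1 (L - v) = (w :: t2, (serveR t1 (L - v)).2) := by rw [← h2]
            rw [hpair]
            rw [if_pos (show ((w :: t2).reverse.length > 0) by simp)]
            have hdrop : ((w :: t2).reverse.dropLast ++
                [(w :: t2).reverse.getLast! - (serveR t1 (L - v)).2]) =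
                ((w - (serveR t1 (L - v)).2) :: t2).reverse := by
              rw [show (w :: t2).reverse = t2.reverse ++ [w] by simp, List.dropLast_concat]
              simp
            rw [hdrop]
            have hsfx : (w :: t2).IsSuffix t1 := h2 ▸ serveR_suffix t1 (L - v)
            have hM2 : pvM (((w - (serveR t1 (L - v)).2) :: t2).reverse) + 1 ≤ fuel := by
              have h3 := pvM_suffix hsfx
              have e1 : pvM (((w - (serveR t1 (L - v)).2) :: t2).reverse) =
                  (w - (serveR t1 (L - v)).2).toNat + pvM t2 + 1 := by
                rw [pvM_reverse, pvM_cons]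
              have e2 := pvM_cons w t2
              have e3 := pvM_cons v t1
              have e4 : (w - (serveR t1 (L - v)).2).toNat ≤ w.toNat := by omega
              omega
            rw [ih _ _ hM2, List.reverse_reverse]
            simp only [bAdj]
            congr 1
            simp only [List.length_reverse, List.length_cons]
            push_cast
            ring
        · -- the trip cannot pop this floor: A decrements it by L, B batches such trips
          have hserve : serveR (v :: t1) L = (v :: t1, L) := by
            simp [serveR, hv]
          rw [hserve]
          rw [if_pos (show ((v :: t1).reverse.length > 0) by simp)]
          have hdrop : ((v :: t1).reverse.dropLast ++ [(v :: t1).reverse.getLast! - L]) =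
              ((v - L) :: t1).reverse := by
            rw [show (v :: t1).reverse = t1.reverse ++ [v] by simp, List.dropLast_concat]
            simp
          rw [hdrop]
          have hM2 : pvM (((v - L) :: t1).reverse) + 1 ≤ fuel := by
            have e1 : pvM (((v - L) :: t1).reverse) = (v - L).toNat + pvM t1 + 1 := by
              rw [pvM_reverse, pvM_cons]
            have e3 := pvM_cons v t1
            have e4 : (v - L).toNat + 1 ≤ v.toNat := by omega
            omega
          rw [ih _ _ hM2, List.reverse_reverse]
          have hbd := boundary_dec L hL v ((t1.length : Int) + 1) time (by omega)
          rw [show (time + (((v :: t1).reverse.length : Int)) * 2) = time + 2 * ((t1.length : Int) + 1)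
            from by simp only [List.length_reverse, List.length_cons]; push_cast; ring]
          simp only [bRun, hbd]

theorem alt_fold (L : Int) : ∀ (xs : List Int) (c : Option Int) (t : Int),
    (xs.foldl
      (fun (st : Option Int × Int × Int) v =>
        let c := st.1
        let time := st.2.1
        let floor := st.2.2
        let ct :=
          match c with
          | none => lt_boundary L v floor time
          | some cc => if v ≤ cc then (some (cc - v), time) else lt_boundary L (v - cc) floor time
        (ct.1, ct.2, floor - 1))
      (c, t, (xs.length : Int))).2.1 = bRun L xs c t := by
  intro xs
  induction xs with
  | nil => intro c t; rfl
  | cons v r ih =>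
    intro c t
    simp only [List.foldl_cons, List.length_cons, Nat.cast_add, Nat.cast_one,
      add_sub_cancel_right]
    rcases c with _ | cc
    · simpa [bRun] using ih _ _
    · by_cases hv : v ≤ cc
      · simp only [if_pos hv, bRun]
        exact ih _ _
      · simp only [if_neg hv, bRun]
        exact ih _ _

theorem alt_eq (floors : List Int) (L : Int) :
    lift_time_alt floors L = bRun L floors.reverse none 0 := by
  rw [lift_time_alt, ← alt_fold]
  simp

-- ===== VERDICT (by name: the statement is the Claim_ definition above) =====
theorem lift_time_spec : Claim_equal_lift_time := by
  intro floors L _ hPre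
  unfold Spec_lift_time
  rw [alt_eq, lift_time]
  exact loop_eq L hPre (pvM floors + 2) floors 0 (by omega)
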